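-- pv_equiv track=rewrite | github.com/ColdWindScholar/MIO-KITCHEN-SOURCE | src/core/encryption_disabler.py | preserve_original_spacing
-- ===== SOURCE A (Python) =====
-- def preserve_original_spacing(original_line: str, processed_line: str) -> str:
--     """
--     Preserves exact spacing from original line by mapping processed parts
--     to original positions, accounting for content length changes
--
--     Args:
--         original_line: Original line with desired spacing
--         processed_line: Processed line with content changes
--
--     Returns:
--         Line with original spacing structure and processed content
--     """
--     orig_parts = original_line.split()
--     proc_parts = processed_line.split()
--
--     if len(orig_parts) != len(proc_parts):
--         # If column count changed, fall back to processed line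
--         return processed_line
--
--     # For preprocessed MTK format, we want to preserve the simple single-space
--     # structure from the original, not the complex spacing that might exist
--     # due to content length differences
--
--     # Calculate the spacing pattern from original
--     spacing_pattern = []
--     current_pos = 0
--
--     for i, part in enumerate(orig_parts):
--         part_start = original_line.find(part, current_pos)
--         if i > 0:
--             # Calculate spacing before this part
--             spacing = part_start - current_pos
--             spacing_pattern.append(spacing)
--         current_pos = part_start + len(part)
--
--     # Rebuild with processed parts using original spacing pattern
--     result = proc_parts[0] # Start with first part
--
--     for i in range(1, len(proc_parts)):
--         if i-1 < len(spacing_pattern):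
--             # Use original spacing pattern
--             spaces = spacing_pattern[i-1]
--             # But limit excessive spacing - if original had reasonable spacing (1-2 chars)
--             # and processed content is much shorter, don't create huge gaps
--             if spaces > 2:
--                 # Check if this is due to content length difference
--                 orig_content_len = len(orig_parts[i-1])
--                 proc_content_len = len(proc_parts[i-1])
--                 content_diff = orig_content_len - proc_content_len
--
--                 if content_diff > 0 and spaces > content_diff:
--                     # Reduce spacing by the content difference, but keep minimum 1 space
--                     spaces = max(1, spaces - content_diff)
--
--             result += ' ' * spaces
--         else:
--             # Fallback to single space
--             result += ' '
--
--         result += proc_parts[i]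
--
--     return result
-- ===== SOURCE B (Python) =====
-- def preserve_original_spacing(original_line: str, processed_line: str) -> str:
--     """Different algorithm: instead of re-locating each token with repeated
--     str.find calls, scan original_line character by character ONCE, collecting
--     its words and the whitespace-run length before each word directly."""
--     words = []      # words of original_line, in order
--     gaps = []       # gaps[i-1] = whitespace run length between words i-1 and i
--     cur = []        # current word buffer
--     pending = 0     # whitespace seen since the last word ended
--     for ch in original_line:
--         if ch.isspace():
--             if cur:
--                 words.append(''.join(cur))
--                 cur = []
--                 pending = 1
--             elif words:
--                 pending += 1
--         else:
--             if not cur and words: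
--                 gaps.append(pending)
--             cur.append(ch)
--     if cur:
--         words.append(''.join(cur))
--
--     proc_parts = processed_line.split()
--     if len(words) != len(proc_parts):
--         return processed_line
--
--     out = proc_parts[0]
--     for i in range(1, len(proc_parts)):
--         g = gaps[i - 1]
--         if g > 2:
--             d = len(words[i - 1]) - len(proc_parts[i - 1])
--             if 0 < d < g:
--                 g = max(1, g - d)
--         out += ' ' * g + proc_parts[i]
--     return out
-- ===== Notes on version B (the rewrite author's own statement) =====
-- stated objective: alternative
-- what changed: B drops A's repeated str.find re-location of every token: it scans original_line character by character once with a small state machine, collecting the words and the whitespace-run length before each word directly, then rebuilds with the same shrink rule.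
import Mathlib
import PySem

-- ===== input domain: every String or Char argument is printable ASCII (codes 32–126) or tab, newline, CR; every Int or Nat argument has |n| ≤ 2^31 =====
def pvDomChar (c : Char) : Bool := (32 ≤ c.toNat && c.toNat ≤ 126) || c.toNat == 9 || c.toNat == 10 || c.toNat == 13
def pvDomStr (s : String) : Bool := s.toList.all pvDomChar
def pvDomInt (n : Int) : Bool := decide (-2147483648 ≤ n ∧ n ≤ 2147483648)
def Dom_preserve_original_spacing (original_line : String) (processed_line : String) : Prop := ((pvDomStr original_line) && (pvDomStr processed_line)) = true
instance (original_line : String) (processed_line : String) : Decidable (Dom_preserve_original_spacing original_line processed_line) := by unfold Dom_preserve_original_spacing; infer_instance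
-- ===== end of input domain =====

-- B replaces A's two find-based phases with a single character-level scan of original_line that
-- collects words and inter-word whitespace-run lengths directly (no str.find); same return value.

-- ===== PORT A =====
-- body of A's first loop (over enumerate(orig_parts); state = (spacing_pattern, current_pos))
def pvStepA1 (o : List Char) (st : List Int × Int) (ip : Int × List Char) : List Int × Int :=
  let part_start := PySem.Chars.findFrom o ip.2 st.2
  (if ip.1 > 0 then st.1 ++ [part_start - st.2] else st.1,
   part_start + (ip.2.length : Int))

-- body of A's second loop (over range(1, len(proc_parts)); state = result)
def pvStepA2 (spacing_pattern : List Int) (orig_parts proc_parts : List (List Char))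
    (result : List Char) (i : Int) : List Char :=
  let result :=
    if i - 1 < (spacing_pattern.length : Int) then
      let spaces := PySem.List.pyGetD spacing_pattern (i - 1) 0
      let spaces :=
        if spaces > 2 then
          let content_diff := ((PySem.List.pyGetD orig_parts (i - 1) []).length : Int)
            - ((PySem.List.pyGetD proc_parts (i - 1) []).length : Int)
          if content_diff > 0 ∧ spaces > content_diff then
            max 1 (spaces - content_diff)
          else spaces
        else spaces
      result ++ PySem.List.pyRepeat [' '] spaces
    else result ++ [' ']
  result ++ PySem.List.pyGetD proc_parts i []

def preserve_original_spacing (original_line : String) (processed_line : String) : String :=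
  let o := original_line.toList
  let orig_parts := PySem.Chars.split₀ o
  let proc_parts := PySem.Chars.split₀ processed_line.toList
  if orig_parts.length ≠ proc_parts.length then
    processed_line
  else
    let st := (PySem.List.enumerate orig_parts).foldl (pvStepA1 o) ([], 0)
    let spacing_pattern := st.1
    match proc_parts with
    | [] => ""   -- Python raises IndexError at proc_parts[0] (excluded by Pre_)
    | r0 :: _ =>
      let result := (PySem.List.pyRange 1 (proc_parts.length : Int)).foldl
        (pvStepA2 spacing_pattern orig_parts proc_parts) r0
      String.ofList result

-- ===== PORT B =====
-- body of Source B's first loop: one char-level scan; state = (words, gaps, cur, pending)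
def pvScanStep (st : List (List Char) × List Int × List Char × Int) (ch : Char) :
    List (List Char) × List Int × List Char × Int :=
  let words := st.1; let gaps := st.2.1; let cur := st.2.2.1; let pending := st.2.2.2
  if PySem.Chars.isspace ch then
    if cur ≠ [] then (words ++ [cur], gaps, [], 1)
    else if words ≠ [] then (words, gaps, cur, pending + 1)
    else (words, gaps, cur, pending)
  else
    if cur = [] ∧ words ≠ [] then (words, gaps ++ [pending], cur ++ [ch], pending)
    else (words, gaps, cur ++ [ch], pending)

-- body of Source B's second loop (over range(1, len(proc_parts)); state = out)
def pvRebuildStep (gaps : List Int) (words procs : List (List Char))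
    (out : List Char) (i : Int) : List Char :=
  let g := PySem.List.pyGetD gaps (i - 1) 0
  let g :=
    if g > 2 then
      let d := ((PySem.List.pyGetD words (i - 1) []).length : Int)
        - ((PySem.List.pyGetD procs (i - 1) []).length : Int)
      if 0 < d ∧ d < g then max 1 (g - d) else g
    else g
  out ++ (PySem.List.pyRepeat [' '] g ++ PySem.List.pyGetD procs i [])

def preserve_original_spacing_alt (original_line : String) (processed_line : String) : String :=
  let st := original_line.toList.foldl pvScanStep ([], [], [], 0)
  let words := if st.2.2.1 ≠ [] then st.1 ++ [st.2.2.1] else st.1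
  let gaps := st.2.1
  let proc_parts := PySem.Chars.split₀ processed_line.toList
  if words.length ≠ proc_parts.length then
    processed_line
  else
    match proc_parts with
    | [] => ""   -- Python raises IndexError at proc_parts[0] (excluded by Pre_)
    | pp0 :: _ =>
      String.ofList ((PySem.List.pyRange 1 (proc_parts.length : Int)).foldl
        (pvRebuildStep gaps words proc_parts) pp0)

-- ===== PRECONDITION & SPEC =====
-- Pre_ excludes exactly the inputs where both lines are entirely whitespace (no tokens):
-- there A raises IndexError at proc_parts[0] (and B raises the same IndexError).
def Pre_preserve_original_spacing (original_line : String) (processed_line : String) : Prop :=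
  PySem.Str.split₀ original_line ≠ [] ∨ PySem.Str.split₀ processed_line ≠ []
instance (original_line : String) (processed_line : String) : Decidable (Pre_preserve_original_spacing original_line processed_line) := by unfold Pre_preserve_original_spacing; infer_instance
def pvWitness_preserve_original_spacing : String × String := ("ab   cd", "x yz")

def Spec_preserve_original_spacing (original_line : String) (processed_line : String) (out : String) : Prop := out = preserve_original_spacing_alt original_line processed_line
instance (original_line : String) (processed_line : String) (out : String) : Decidable (Spec_preserve_original_spacing original_line processed_line out) := by unfold Spec_preserve_original_spacing; infer_instance

-- ===== CLAIM =====
def Claim_equal_preserve_original_spacing : Prop := ∀ (original_line : String) (processed_line : String), Dom_preserve_original_spacing original_line processed_line → Pre_preserve_original_spacing original_line processed_line → Spec_preserve_original_spacing original_line processed_line (preserve_original_spacing original_line processed_line)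

-- ===== LEMMAS AND PROOFS =====
def pvTok (s : List Char) : List (Int × List Char) :=
  if h : s.dropWhile PySem.Chars.isspace = [] then []
  else
    (((s.length - (s.dropWhile PySem.Chars.isspace).length : Nat) : Int),
      (s.dropWhile PySem.Chars.isspace).takeWhile (fun c => !PySem.Chars.isspace c)) ::
    pvTok ((s.dropWhile PySem.Chars.isspace).drop
      ((s.dropWhile PySem.Chars.isspace).takeWhile (fun c => !PySem.Chars.isspace c)).length)
termination_by s.length
decreasing_by
  have h1 : (s.dropWhile PySem.Chars.isspace).length ≤ s.length := List.length_dropWhile_le _ _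
  obtain ⟨c, t, hct⟩ := List.exists_cons_of_ne_nil h
  have hc : PySem.Chars.isspace c = false := by
    have := List.head_dropWhile_not PySem.Chars.isspace h
    simp only [hct, List.head_cons] at this
    exact this
  have hw : ((s.dropWhile PySem.Chars.isspace).takeWhile (fun c => !PySem.Chars.isspace c)) ≠ [] := by
    rw [hct]
    simp [hc]
  have h2 : 0 < ((s.dropWhile PySem.Chars.isspace).takeWhile (fun c => !PySem.Chars.isspace c)).length :=
    List.length_pos_of_ne_nil hw
  have h3 : 0 < (s.dropWhile PySem.Chars.isspace).length := by
    rw [hct]; simp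
  simp only [List.length_drop]
  omega

lemma pvTok_nil : pvTok [] = [] := by rw [pvTok]; simp

lemma pvTok_cons_ws (c : Char) (s : List Char) (hc : PySem.Chars.isspace c = true) :
    pvTok (c :: s) = match pvTok s with
      | [] => []
      | (g, w) :: t => (g + 1, w) :: t := by
  conv_lhs => rw [pvTok]
  conv_rhs => rw [pvTok]
  have hd : (c :: s).dropWhile PySem.Chars.isspace = s.dropWhile PySem.Chars.isspace := by
    simp [hc]
  by_cases h : s.dropWhile PySem.Chars.isspace = []
  · simp [hd, h]
  · have hle : (s.dropWhile PySem.Chars.isspace).length ≤ s.length := List.length_dropWhile_le _ _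
    simp only [hd, h, List.length_cons]
    have hcast : ((s.length + 1 - (s.dropWhile PySem.Chars.isspace).length : Nat) : Int)
        = ((s.length - (s.dropWhile PySem.Chars.isspace).length : Nat) : Int) + 1 := by omega
    rw [hcast]
    simp

lemma pvTok_cons_w (c : Char) (s : List Char) (hc : PySem.Chars.isspace c = false) :
    pvTok (c :: s) = (0, c :: s.takeWhile (fun c => !PySem.Chars.isspace c)) ::
      pvTok (s.dropWhile (fun c => !PySem.Chars.isspace c)) := by
  conv_lhs => rw [pvTok]
  have hd : (c :: s).dropWhile PySem.Chars.isspace = c :: s := by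
    simp [hc]
  have ht : (c :: s).takeWhile (fun c => !PySem.Chars.isspace c)
      = c :: s.takeWhile (fun c => !PySem.Chars.isspace c) := by
    simp [hc]
  have hdr : s.drop (s.takeWhile (fun c => !PySem.Chars.isspace c)).length
      = s.dropWhile (fun c => !PySem.Chars.isspace c) := by
    have hh := List.takeWhile_append_dropWhile (p := fun c => !PySem.Chars.isspace c) (l := s)
    calc s.drop (s.takeWhile (fun c => !PySem.Chars.isspace c)).length
        = (s.takeWhile (fun c => !PySem.Chars.isspace c) ++ s.dropWhile (fun c => !PySem.Chars.isspace c)).drop (s.takeWhile (fun c => !PySem.Chars.isspace c)).length := by rw [hh]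
      _ = s.dropWhile (fun c => !PySem.Chars.isspace c) := List.drop_left
  simp [hd, ht, hdr]

def pvFlush (st : List (List Char) × List Int × List Char × Int) :
    List (List Char) × List Int :=
  (if st.2.2.1 ≠ [] then st.1 ++ [st.2.2.1] else st.1, st.2.1)

lemma pv_scan_spec : ∀ (s : List Char) (ws : List (List Char)) (gs : List Int)
    (cur : List Char) (p : Int),
    pvFlush (s.foldl pvScanStep (ws, gs, cur, p)) =
      if cur ≠ [] then
        (ws ++ (cur ++ s.takeWhile (fun c => !PySem.Chars.isspace c)) ::
           (pvTok (s.dropWhile (fun c => !PySem.Chars.isspace c))).map Prod.snd,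
         gs ++ (pvTok (s.dropWhile (fun c => !PySem.Chars.isspace c))).map Prod.fst)
      else if ws = [] then
        ((pvTok s).map Prod.snd, gs ++ ((pvTok s).tail).map Prod.fst)
      else
        (ws ++ (pvTok s).map Prod.snd,
         gs ++ match pvTok s with
           | [] => []
           | (g, _) :: t => (p + g) :: t.map Prod.fst) := by
  intro s
  induction s with
  | nil =>
    intro ws gs cur p
    simp only [List.foldl_nil, pvFlush, pvTok_nil]
    by_cases hcur : cur = [] <;> by_cases hws : ws = [] <;> simp [hcur, hws, pvTok_nil]
  | cons c s ih =>
    intro ws gs cur p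
    simp only [List.foldl_cons]
    by_cases hc : PySem.Chars.isspace c = true
    · by_cases hcur : cur = []
      · by_cases hws : ws = []
        · -- state unchanged
          have hstep : pvScanStep (ws, gs, cur, p) c = (ws, gs, cur, p) := by
            simp [pvScanStep, hc, hcur, hws]
          rw [hstep, ih]
          simp only [hcur, hws]
          rw [pvTok_cons_ws c s hc]
          cases htok : pvTok s with
          | nil => simp
          | cons gw t => cases gw; simp
        · -- between words: pending + 1
          have hstep : pvScanStep (ws, gs, cur, p) c = (ws, gs, cur, p + 1) := by
            simp [pvScanStep, hc, hcur, hws]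
          rw [hstep, ih]
          simp only [hcur, hws]
          rw [pvTok_cons_ws c s hc]
          cases htok : pvTok s with
          | nil => simp
          | cons gw t =>
            cases gw
            simp only [htok]
            simp
            ring_nf
      · -- word ends
        have hstep : pvScanStep (ws, gs, cur, p) c = (ws ++ [cur], gs, [], 1) := by
          simp [pvScanStep, hc, hcur]
        rw [hstep, ih]
        have hws' : ws ++ [cur] ≠ [] := by simp
        simp only [hws', if_neg, hcur]
        rw [pvTok_cons_ws c s hc]
        have htk : (c :: s).takeWhile (fun c => !PySem.Chars.isspace c) = [] := by
          simp [hc]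
        have hdk : (c :: s).dropWhile (fun c => !PySem.Chars.isspace c) = c :: s := by
          simp [hc]
        cases htok : pvTok s with
        | nil =>
          simp only [htok, htk, hdk, pvTok_cons_ws c s hc, pvTok_nil]
          simp [hcur]
        | cons gw t =>
          cases gw
          simp only [htok, htk, hdk, pvTok_cons_ws c s hc]
          simp [hcur]
          omega
    · -- non-space char
      have hc' : PySem.Chars.isspace c = false := by simpa using hc
      by_cases hcur : cur = []
      · by_cases hws : ws = []
        · have hstep : pvScanStep (ws, gs, cur, p) c = (ws, gs, cur ++ [c], p) := by
            simp [pvScanStep, hc', hcur, hws]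
          rw [hstep, ih]
          have : cur ++ [c] ≠ [] := by simp
          simp only [this, if_neg, hcur, hws]
          rw [pvTok_cons_w c s hc']
          simp
        · have hstep : pvScanStep (ws, gs, cur, p) c = (ws, gs ++ [p], cur ++ [c], p) := by
            simp [pvScanStep, hc', hcur, hws]
          rw [hstep, ih]
          have hne2 : cur ++ [c] ≠ [] := by simp
          simp only [hne2, if_neg, hcur, hws]
          rw [pvTok_cons_w c s hc']
          simp
      · have hstep : pvScanStep (ws, gs, cur, p) c = (ws, gs, cur ++ [c], p) := by
          simp [pvScanStep, hc', hcur]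
        rw [hstep, ih]
        have hne : cur ++ [c] ≠ [] := by simp
        have htk : (c :: s).takeWhile (fun c => !PySem.Chars.isspace c)
            = c :: s.takeWhile (fun c => !PySem.Chars.isspace c) := by
          simp [hc']
        have hdk : (c :: s).dropWhile (fun c => !PySem.Chars.isspace c)
            = s.dropWhile (fun c => !PySem.Chars.isspace c) := by
          simp [hc']
        simp [htk, hdk, hne, hcur]


lemma pv_split_go_spec : ∀ (s : List Char) (cur : List Char) (acc : List (List Char)),
    PySem.Chars.split₀.go s cur acc =
      acc.reverse ++ (if cur = [] then (pvTok s).map Prod.snd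
        else (cur.reverse ++ s.takeWhile (fun c => !PySem.Chars.isspace c)) ::
          (pvTok (s.dropWhile (fun c => !PySem.Chars.isspace c))).map Prod.snd) := by
  intro s
  induction s with
  | nil =>
    intro cur acc
    rw [PySem.Chars.split₀.go]
    by_cases hcur : cur = [] <;> simp [hcur, pvTok_nil]
  | cons c s ih =>
    intro cur acc
    rw [PySem.Chars.split₀.go]
    by_cases hc : PySem.Chars.isspace c = true
    · simp only [hc, if_pos]
      by_cases hcur : cur = []
      · simp only [hcur, List.isEmpty_nil, if_pos, ih]
        rw [pvTok_cons_ws c s hc]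
        cases htok : pvTok s with
        | nil => simp
        | cons gw t => cases gw; simp
      · have : cur.isEmpty = false := by simpa [List.isEmpty_iff] using hcur
        simp only [this, if_neg, ih]
        have htk : (c :: s).takeWhile (fun c => !PySem.Chars.isspace c) = [] := by
          simp [hc]
        have hdk : (c :: s).dropWhile (fun c => !PySem.Chars.isspace c) = c :: s := by
          simp [hc]
        rw [pvTok_cons_ws c s hc]
        cases htok : pvTok s with
        | nil => simp [htok, htk, hdk, hcur, pvTok_cons_ws c s hc, pvTok_nil]
        | cons gw t => cases gw; simp [htok, htk, hdk, hcur, pvTok_cons_ws c s hc]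
    · have hc' : PySem.Chars.isspace c = false := by simpa using hc
      simp only [hc', if_neg, ih]
      have htk : (c :: s).takeWhile (fun c => !PySem.Chars.isspace c)
          = c :: s.takeWhile (fun c => !PySem.Chars.isspace c) := by
        simp [hc']
      have hdk : (c :: s).dropWhile (fun c => !PySem.Chars.isspace c)
          = s.dropWhile (fun c => !PySem.Chars.isspace c) := by
        simp [hc']
      by_cases hcur : cur = []
      · simp [hcur, pvTok_cons_w c s hc']
      · simp [hcur, htk, hdk]

lemma pv_split₀_eq_tok (s : List Char) :
    PySem.Chars.split₀ s = (pvTok s).map Prod.snd := by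
  rw [PySem.Chars.split₀, pv_split_go_spec]
  simp

def pvPosAt (o : List Char) (parts : List (List Char)) : Nat → Int
  | 0 => PySem.Chars.find o (parts.getD 0 []) + ((parts.getD 0 []).length : Int)
  | j+1 => PySem.Chars.findFrom o (parts.getD (j+1) []) (pvPosAt o parts j)
             + ((parts.getD (j+1) []).length : Int)

def pvGapAt (o : List Char) (parts : List (List Char)) (i : Nat) : Int :=
  PySem.Chars.findFrom o (parts.getD i []) (pvPosAt o parts (i-1)) - pvPosAt o parts (i-1)

-- shape facts extracted from one pvTok step
lemma pv_tok_shape (s : List Char) (g : Int) (w : List Char) (t : List (Int × List Char))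
    (h : pvTok s = (g, w) :: t) :
    0 ≤ g ∧ g.toNat + w.length ≤ s.length
    ∧ (∃ c w', w = c :: w' ∧ PySem.Chars.isspace c = false)
    ∧ w <+: s.drop g.toNat
    ∧ (∀ i : Nat, i < g.toNat → ∃ hi : i < s.length, PySem.Chars.isspace s[i] = true)
    ∧ pvTok (s.drop (g.toNat + w.length)) = t := by
  rw [pvTok] at h
  by_cases hnil : s.dropWhile PySem.Chars.isspace = []
  · simp [hnil] at h
  · simp only [hnil] at h
    obtain ⟨⟨rfl, rfl⟩, rfl⟩ := h
    have hlen : (s.takeWhile PySem.Chars.isspace).length + (s.dropWhile PySem.Chars.isspace).length = s.length := by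
      rw [← List.length_append, List.takeWhile_append_dropWhile]
    have hdrop : s.drop (s.takeWhile PySem.Chars.isspace).length = s.dropWhile PySem.Chars.isspace := by
      have hh := List.takeWhile_append_dropWhile (p := PySem.Chars.isspace) (l := s)
      calc s.drop (s.takeWhile PySem.Chars.isspace).length
          = (s.takeWhile PySem.Chars.isspace ++ s.dropWhile PySem.Chars.isspace).drop
              (s.takeWhile PySem.Chars.isspace).length := by rw [hh]
        _ = s.dropWhile PySem.Chars.isspace := List.drop_left
    have htn : (((s.length - (s.dropWhile PySem.Chars.isspace).length : Nat) : Int)).toNat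
        = (s.takeWhile PySem.Chars.isspace).length := by
      simp; omega
    have hwle : ((s.dropWhile PySem.Chars.isspace).takeWhile (fun c => !PySem.Chars.isspace c)).length
        ≤ (s.dropWhile PySem.Chars.isspace).length :=
      (List.takeWhile_prefix _).length_le
    refine ⟨by positivity, ?_, ?_, ?_, ?_, ?_⟩
    · rw [htn]; omega
    · obtain ⟨c, t', hct⟩ := List.exists_cons_of_ne_nil hnil
      have hc : PySem.Chars.isspace c = false := by
        have := List.head_dropWhile_not PySem.Chars.isspace hnil
        simp only [hct, List.head_cons] at this
        exact this
      refine ⟨c, (t'.takeWhile (fun c => !PySem.Chars.isspace c)), ?_, hc⟩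
      rw [hct]
      simp [hc]
    · rw [htn, hdrop]
      exact List.takeWhile_prefix _
    · intro i hi
      rw [htn] at hi
      have hisl : i < s.length := by omega
      refine ⟨hisl, ?_⟩
      have hmem : s[i] ∈ s.takeWhile PySem.Chars.isspace := by
        have hg2 : (s.takeWhile PySem.Chars.isspace)[i]'hi = s[i] :=
          (List.takeWhile_prefix _).getElem hi
        rw [← hg2]
        exact List.getElem_mem _
      exact List.mem_takeWhile_imp hmem
    · congr 1
      rw [htn, ← List.drop_drop, hdrop]

-- find of the next word from the end of the previous one lands exactly after the gap
lemma pv_find_eq (s : List Char) (g : Int) (w : List Char) (t : List (Int × List Char))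
    (h : pvTok s = (g, w) :: t) :
    PySem.Chars.find s w = g := by
  obtain ⟨hg0, hle, ⟨c, w', hw, hc⟩, hpre, hsp, -⟩ := pv_tok_shape s g w t h
  have hinf : w <:+: s := hpre.isInfix.trans (List.drop_suffix _ _).isInfix
  have hne : PySem.Chars.find s w ≠ -1 := by
    rw [PySem.Chars.find_ne_neg_one_iff]; exact hinf
  have hnn : 0 ≤ PySem.Chars.find s w := by
    rw [PySem.Chars.find_nonneg_iff]; exact hinf
  obtain ⟨hfp, hfmin⟩ := PySem.Chars.find_spec (s := s) (sub := w) hnn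
  -- no occurrence of w before g.toNat
  have hno : ∀ i : Nat, i < g.toNat → ¬ w <+: s.drop i := by
    intro i hi hcontra
    obtain ⟨hisl, hspace⟩ := hsp i hi
    obtain ⟨u, hu⟩ := hcontra
    rw [hw] at hu
    have hdi : s.drop i = s[i] :: s.drop (i+1) := List.drop_eq_getElem_cons hisl
    rw [hdi] at hu
    have : c = s[i] := by
      have h2 := congrArg (·.head?) hu
      simp only [List.head?_cons, List.cons_append] at h2
      simpa using h2
    rw [← this] at hspace
    rw [hspace] at hc
    exact absurd hc (by simp)
  have hf : (PySem.Chars.find s w).toNat = g.toNat := by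
    by_contra hne2
    rcases Nat.lt_or_ge (PySem.Chars.find s w).toNat g.toNat with hlt | hge
    · exact hno _ hlt hfp
    · have : (PySem.Chars.find s w).toNat ≠ g.toNat := hne2
      have hgt : g.toNat < (PySem.Chars.find s w).toNat := by omega
      exact hfmin g.toNat hgt hpre
  omega

lemma pv_getD_map_snd (toks : List (Int × List Char)) (i : Nat) (hi : i < toks.length) :
    (toks.map Prod.snd).getD i [] = (toks[i]'hi).snd := by
  rw [List.getD_eq_getElem?_getD, List.getElem?_map, List.getElem?_eq_getElem hi]
  simp

lemma pv_chain (o : List Char) : ∀ j, j < (pvTok o).length →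
    0 ≤ pvPosAt o ((pvTok o).map Prod.snd) j
    ∧ (pvPosAt o ((pvTok o).map Prod.snd) j).toNat ≤ o.length
    ∧ pvTok (o.drop (pvPosAt o ((pvTok o).map Prod.snd) j).toNat) = (pvTok o).drop (j+1) := by
  intro j
  induction j with
  | zero =>
    intro hj
    have hne : pvTok o ≠ [] := by intro hc; rw [hc] at hj; simp at hj
    obtain ⟨gw, t, htok⟩ := List.exists_cons_of_ne_nil hne
    obtain ⟨g, w⟩ := gw
    obtain ⟨hg0, hle, -, -, -, hrec⟩ := pv_tok_shape o g w t htok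
    have hfind : PySem.Chars.find o w = g := pv_find_eq o g w t htok
    have hget : ((pvTok o).map Prod.snd).getD 0 [] = w := by
      rw [htok]; rfl
    have hpos : pvPosAt o ((pvTok o).map Prod.snd) 0 = g + (w.length : Int) := by
      rw [pvPosAt, hget, hfind]
    have htn : (g + (w.length : Int)).toNat = g.toNat + w.length := by omega
    refine ⟨by omega, by omega, ?_⟩
    rw [hpos, htn, hrec, htok]
    rfl
  | succ j ih =>
    intro hj
    obtain ⟨he0, hel, hrec⟩ := ih (by omega)
    set e := pvPosAt o ((pvTok o).map Prod.snd) j with hedef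
    have hdropj : (pvTok o).drop (j+1) = (pvTok o)[j+1]'hj :: (pvTok o).drop (j+1+1) :=
      List.drop_eq_getElem_cons hj
    set g := ((pvTok o)[j+1]'hj).1 with hgdef
    set w := ((pvTok o)[j+1]'hj).2 with hwdef
    have htokd : pvTok (o.drop e.toNat) = (g, w) :: (pvTok o).drop (j+1+1) := by
      rw [hrec, hdropj]
    obtain ⟨hg0, hle, -, -, -, hrec2⟩ := pv_tok_shape _ g w _ htokd
    have hfind : PySem.Chars.find (o.drop e.toNat) w = g := pv_find_eq _ g w _ htokd
    have hget : ((pvTok o).map Prod.snd).getD (j+1) [] = w := pv_getD_map_snd _ _ hj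
    have hff : PySem.Chars.findFrom o w e none = e + g := by
      have he : e = ((e.toNat : Nat) : Int) := by omega
      rw [he, PySem.Chars.findFrom_natCast o w e.toNat hel, hfind]
      have : g ≠ -1 := by omega
      rw [if_neg this]
    have hpos : pvPosAt o ((pvTok o).map Prod.snd) (j+1) = e + g + (w.length : Int) := by
      rw [pvPosAt, hget, ← hedef, hff]
    have hdl : (o.drop e.toNat).length = o.length - e.toNat := by simp
    have htn : (e + g + (w.length : Int)).toNat = e.toNat + (g.toNat + w.length) := by omega
    refine ⟨by omega, by omega, ?_⟩
    rw [hpos, htn, ← List.drop_drop, hrec2]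

lemma pv_gap_eq (o : List Char) (i : Nat) (hi1 : 1 ≤ i) (hi : i < (pvTok o).length) :
    pvGapAt o ((pvTok o).map Prod.snd) i = ((pvTok o)[i]'hi).1 := by
  obtain ⟨j, rfl⟩ : ∃ j, i = j + 1 := ⟨i - 1, by omega⟩
  obtain ⟨he0, hel, hrec⟩ := pv_chain o j (by omega)
  set e := pvPosAt o ((pvTok o).map Prod.snd) j with hedef
  have hdropj : (pvTok o).drop (j+1) = (pvTok o)[j+1]'hi :: (pvTok o).drop (j+1+1) :=
    List.drop_eq_getElem_cons hi
  set g := ((pvTok o)[j+1]'hi).1 with hgdef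
  set w := ((pvTok o)[j+1]'hi).2 with hwdef
  have htokd : pvTok (o.drop e.toNat) = (g, w) :: (pvTok o).drop (j+1+1) := by
    rw [hrec, hdropj]
  obtain ⟨hg0, -, -, -, -, -⟩ := pv_tok_shape _ g w _ htokd
  have hfind : PySem.Chars.find (o.drop e.toNat) w = g := pv_find_eq _ g w _ htokd
  have hget : ((pvTok o).map Prod.snd).getD (j+1) [] = w := pv_getD_map_snd _ _ hi
  have hff : PySem.Chars.findFrom o w e none = e + g := by
    have he : e = ((e.toNat : Nat) : Int) := by omega
    rw [he, PySem.Chars.findFrom_natCast o w e.toNat hel, hfind]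
    have : g ≠ -1 := by omega
    rw [if_neg this]
  rw [pvGapAt]
  simp only [Nat.add_sub_cancel]
  rw [hget, ← hedef, hff]
  ring

-- the i-th emitted piece (shrunken gap + processed token), i ≥ 1
def pvPiece (o : List Char) (parts procs : List (List Char)) (i : Nat) : List Char :=
  let gap := pvGapAt o parts i
  let gap :=
    if gap > 2 then
      let d := ((parts.getD (i-1) []).length : Int) - ((procs.getD (i-1) []).length : Int)
      if 0 < d ∧ d < gap then max 1 (gap - d) else gap
    else gap
  PySem.List.pyRepeat [' '] gap ++ procs.getD i []

lemma pv_gen1 (o : List Char) (parts : List (List Char)) :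
    ∀ (t : List (List Char)) (k : Nat) (acc : List Int), 1 ≤ k → parts.drop k = t →
    List.foldl (pvStepA1 o) (acc, pvPosAt o parts (k-1)) (PySem.List.enumerate t (k : Int)) =
    (acc ++ (List.range' k t.length).map (pvGapAt o parts), pvPosAt o parts (k-1+t.length)) := by
  intro t
  induction t with
  | nil => intro k acc hk hd; simp [PySem.List.enumerate]
  | cons x t ih =>
    intro k acc hk hd
    obtain ⟨j, rfl⟩ : ∃ j, k = j + 1 := ⟨k - 1, by omega⟩
    have hx : parts.getD (j+1) [] = x := by
      have h0 : (parts.drop (j+1))[0]? = some x := by rw [hd]; rfl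
      rw [List.getElem?_drop] at h0
      simp [List.getD_eq_getElem?_getD, h0]
    have hstep : pvStepA1 o (acc, pvPosAt o parts (j+1-1)) (((j+1 : Nat) : Int), x) =
        (acc ++ [pvGapAt o parts (j+1)], pvPosAt o parts (j+1)) := by
      simp only [pvStepA1, pvGapAt, pvPosAt, hx]
      simp
    have hd' : parts.drop (j+1+1) = t := by
      have h2 : parts.drop (j+1+1) = (parts.drop (j+1)).drop 1 := by
        rw [List.drop_drop]
      rw [h2, hd]; rfl
    have := ih (j+1+1) (acc ++ [pvGapAt o parts (j+1)]) (by omega) hd'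
    norm_num at this
    simp only [PySem.List.enumerate, List.foldl_cons]
    rw [hstep]
    push_cast
    rw [this]
    rw [show (x::t).length = t.length + 1 from rfl, List.range'_succ]
    simp
    congr 1
    omega

lemma pv_top1 (o : List Char) (parts : List (List Char)) (op0 : List Char) (ops : List (List Char))
    (h : parts = op0 :: ops) :
    (PySem.List.enumerate parts).foldl (pvStepA1 o) ([], 0) =
    ((List.range' 1 ops.length).map (pvGapAt o parts), pvPosAt o parts ops.length) := by
  have hstep : pvStepA1 o ([], 0) ((0 : Int), op0) = ([], pvPosAt o parts 0) := by
    simp [pvStepA1, pvPosAt, h, PySem.Chars.findFrom_zero]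
  have hd : parts.drop 1 = ops := by rw [h]; rfl
  have := pv_gen1 o parts ops 1 [] (by omega) hd
  conv_lhs => rw [h]
  simp only [PySem.List.enumerate, List.foldl_cons]
  rw [show ((0:Int)+1) = ((1:Nat):Int) by norm_num]
  rw [hstep]
  norm_num at this
  exact this

lemma pv_A2 (o : List Char) (parts procs : List (List Char)) (sp : List Int)
    (hsp : sp = (List.range' 1 (procs.length - 1)).map (pvGapAt o parts)) (hpr : 1 ≤ procs.length) (r0 : List Char) :
    List.foldl (pvStepA2 sp parts procs) r0 (PySem.List.pyRange 1 (procs.length : Int)) =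
    r0 ++ (PySem.List.pyRange 1 (procs.length : Int)).flatMap (fun i => pvPiece o parts procs i.toNat) := by
  rw [PySem.List.foldl_congr_mem (PySem.List.pyRange 1 (procs.length : Int)) (pvStepA2 sp parts procs)
      (fun acc i => acc ++ pvPiece o parts procs i.toNat) r0 ?_]
  · exact PySem.List.foldl_append_eq_flatMap _ _ _
  · intro acc i hi
    rw [PySem.List.mem_pyRange_one] at hi
    obtain ⟨h1, h2⟩ := hi
    have hlen : sp.length = procs.length - 1 := by simp [hsp]
    have hbound : i - 1 < (sp.length : Int) := by
      rw [hlen]; omega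
    have hj : (i - 1).toNat < procs.length - 1 := by omega
    have hget : PySem.List.pyGetD sp (i - 1) 0 = pvGapAt o parts i.toNat := by
      rw [PySem.List.pyGetD_of_nonneg sp 0 (by omega)]
      rw [hsp]
      rw [List.getD_eq_getElem?_getD]
      rw [List.getElem?_eq_getElem (by simpa using hj)]
      simp only [List.getElem_map, List.getElem_range', Option.getD_some]
      congr 1
      omega
    have hgo : PySem.List.pyGetD parts (i - 1) [] = parts.getD (i.toNat - 1) [] := by
      rw [PySem.List.pyGetD_of_nonneg parts [] (by omega)]
      congr 1
      omega
    have hgp : PySem.List.pyGetD procs (i - 1) [] = procs.getD (i.toNat - 1) [] := by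
      rw [PySem.List.pyGetD_of_nonneg procs [] (by omega)]
      congr 1
      omega
    have hgi : PySem.List.pyGetD procs i [] = procs.getD i.toNat [] := by
      rw [PySem.List.pyGetD_of_nonneg procs [] (by omega)]
    simp only [pvStepA2, pvPiece, hbound, if_pos, hget, hgo, hgp, hgi]
    simp [List.append_assoc]

lemma pv_B2 (o : List Char) (procs : List (List Char))
    (hlen : procs.length = (pvTok o).length) (pp0 : List Char) :
    List.foldl (pvRebuildStep ((pvTok o).tail.map Prod.fst) ((pvTok o).map Prod.snd) procs) pp0
        (PySem.List.pyRange 1 (procs.length : Int))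
      = pp0 ++ (PySem.List.pyRange 1 (procs.length : Int)).flatMap
          (fun i => pvPiece o ((pvTok o).map Prod.snd) procs i.toNat) := by
  rw [PySem.List.foldl_congr_mem (PySem.List.pyRange 1 (procs.length : Int))
      (pvRebuildStep ((pvTok o).tail.map Prod.fst) ((pvTok o).map Prod.snd) procs)
      (fun acc i => acc ++ pvPiece o ((pvTok o).map Prod.snd) procs i.toNat) pp0 ?_]
  · exact PySem.List.foldl_append_eq_flatMap _ _ _
  · intro acc i hi
    rw [PySem.List.mem_pyRange_one] at hi
    obtain ⟨h1, h2⟩ := hi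
    have hit : i.toNat < (pvTok o).length := by omega
    have hit1 : 1 ≤ i.toNat := by omega
    have hgap : PySem.List.pyGetD ((pvTok o).tail.map Prod.fst) (i - 1) 0
        = pvGapAt o ((pvTok o).map Prod.snd) i.toNat := by
      rw [PySem.List.pyGetD_of_nonneg _ _ (by omega)]
      rw [pv_gap_eq o i.toNat hit1 hit]
      rw [List.getD_eq_getElem?_getD, List.getElem?_map]
      have htl : (i - 1).toNat < (pvTok o).tail.length := by
        simp only [List.length_tail]; omega
      rw [List.getElem?_eq_getElem htl]
      simp only [Option.map_some, Option.getD_some, List.getElem_tail]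
      congr 2
      omega
    have hgo : PySem.List.pyGetD ((pvTok o).map Prod.snd) (i - 1) []
        = ((pvTok o).map Prod.snd).getD (i.toNat - 1) [] := by
      rw [PySem.List.pyGetD_of_nonneg _ [] (by omega)]
      congr 1
      omega
    have hgp : PySem.List.pyGetD procs (i - 1) [] = procs.getD (i.toNat - 1) [] := by
      rw [PySem.List.pyGetD_of_nonneg procs [] (by omega)]
      congr 1
      omega
    have hgi : PySem.List.pyGetD procs i [] = procs.getD i.toNat [] := by
      rw [PySem.List.pyGetD_of_nonneg procs [] (by omega)]
    simp only [pvRebuildStep, pvPiece, hgap, hgo, hgp, hgi]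

lemma pv_main (original_line processed_line : String)
    (hpre : PySem.Str.split₀ original_line ≠ [] ∨ PySem.Str.split₀ processed_line ≠ []) :
    preserve_original_spacing original_line processed_line =
    preserve_original_spacing_alt original_line processed_line := by
  simp only [preserve_original_spacing, preserve_original_spacing_alt]
  have hscan := pv_scan_spec original_line.toList [] [] [] 0
  simp only [ne_eq, not_true_eq_false, if_false, if_pos, List.nil_append] at hscan
  have hwords : (if (List.foldl pvScanStep ([], [], [], 0) original_line.toList).2.2.1 ≠ [] then
        (List.foldl pvScanStep ([], [], [], 0) original_line.toList).1 ++
          [(List.foldl pvScanStep ([], [], [], 0) original_line.toList).2.2.1]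
      else (List.foldl pvScanStep ([], [], [], 0) original_line.toList).1)
      = (pvTok original_line.toList).map Prod.snd := by
    have := congrArg Prod.fst hscan
    simpa [pvFlush] using this
  have hgaps : (List.foldl pvScanStep ([], [], [], 0) original_line.toList).2.1
      = ((pvTok original_line.toList).tail).map Prod.fst := by
    have := congrArg Prod.snd hscan
    simpa [pvFlush] using this
  have hsplit : PySem.Chars.split₀ original_line.toList
      = (pvTok original_line.toList).map Prod.snd := pv_split₀_eq_tok _
  rw [hwords, hgaps, hsplit]
  by_cases hlen : ((pvTok original_line.toList).map Prod.snd).length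
      = (PySem.Chars.split₀ processed_line.toList).length
  · have hpre' : (pvTok original_line.toList).map Prod.snd ≠ []
        ∨ PySem.Chars.split₀ processed_line.toList ≠ [] := by
      rcases hpre with h | h
      · left; rw [← hsplit]; simpa [PySem.Str.split₀] using h
      · right; simpa [PySem.Str.split₀] using h
    have hpp : PySem.Chars.split₀ processed_line.toList ≠ [] := by
      intro hc
      rw [hc, List.length_nil] at hlen
      rcases hpre' with h | h
      · exact h (List.eq_nil_of_length_eq_zero hlen)
      · exact h hc
    have hop : (pvTok original_line.toList).map Prod.snd ≠ [] := by
      intro hc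
      rw [hc, List.length_nil] at hlen
      exact hpp (List.eq_nil_of_length_eq_zero hlen.symm)
    obtain ⟨op0, ops, hps⟩ := List.exists_cons_of_ne_nil hop
    obtain ⟨pp0, pps, hqs⟩ := List.exists_cons_of_ne_nil hpp
    rw [if_neg (by simp [hlen]), if_neg (by simp [hlen])]
    rw [hps, hqs]
    have hlen' : ops.length = pps.length := by
      rw [hps, hqs] at hlen; simpa using hlen
    have ht1 := pv_top1 original_line.toList ((pvTok original_line.toList).map Prod.snd) op0 ops hps
    rw [hps] at ht1
    rw [ht1]
    dsimp only
    have hsp : (List.range' 1 ops.length).map (pvGapAt original_line.toList (op0 :: ops)) =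
        (List.range' 1 ((pp0 :: pps).length - 1)).map (pvGapAt original_line.toList (op0 :: ops)) := by
      simp [hlen']
    have hA2 := pv_A2 original_line.toList (op0 :: ops) (pp0 :: pps)
      ((List.range' 1 ops.length).map (pvGapAt original_line.toList (op0 :: ops))) hsp
      (by simp) pp0
    rw [hA2]
    have hlen2 : (pp0 :: pps).length = (pvTok original_line.toList).length := by
      rw [← hqs, ← hlen]; simp
    have hB2 := pv_B2 original_line.toList (pp0 :: pps) hlen2 pp0
    rw [hps] at hB2
    rw [hB2]
  · rw [if_pos (by simpa using hlen), if_pos (by simpa using hlen)]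

-- ===== VERDICT (by name: the statement is the Claim_ definition above) =====
theorem preserve_original_spacing_spec : Claim_equal_preserve_original_spacing := by
  intro original_line processed_line _ hpre
  unfold Spec_preserve_original_spacing
  exact pv_main original_line processed_line hpre
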